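-- pv_equiv track=rewrite | github.com/ChristopherHoole/gads-data-layer | act_dashboard/engine/negatives/pass1.py | _phrase_tokens_in_sequence
-- ===== SOURCE A (Python) =====
-- def _phrase_tokens_in_sequence(phrase_tokens: list[str], query_tokens: list[str]) -> bool:
--     """True if `phrase_tokens` appears as a contiguous subsequence of
--     `query_tokens`. Mirrors Google Ads phrase-match semantics (word-based,
--     not char-substring). Prevents 'low' matching 'hounslow'."""
--     n = len(phrase_tokens)
--     if not n or n > len(query_tokens):
--         return False
--     for i in range(len(query_tokens) - n + 1):
--         if query_tokens[i:i + n] == phrase_tokens: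
--             return True
--     return False
-- ===== SOURCE B (Python) =====
-- def _phrase_tokens_in_sequence(phrase_tokens: list[str], query_tokens: list[str]) -> bool:
--     """Rabin-Karp over token ids: tokens are interned to small integer ids,
--     each length-n window of the query carries a rolling polynomial
--     fingerprint (mod a fixed prime) that is compared against the phrase's
--     fingerprint, and the actual tokens are re-checked only on a hit."""
--     n = len(phrase_tokens)
--     m = len(query_tokens)
--     if n == 0 or n > m:
--         return False
--     M = (1 << 61) - 1
--     ids = {}
--     for t in query_tokens:
--         if t not in ids:
--             ids[t] = len(ids)
--     for t in phrase_tokens: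
--         if t not in ids:
--             ids[t] = len(ids)
--     q = [ids[t] for t in query_tokens]
--     p = [ids[t] for t in phrase_tokens]
--     base = len(ids) + 1
--     target = 0
--     for x in p:
--         target = (target * base + x) % M
--     h = 0
--     for x in q[:n]:
--         h = (h * base + x) % M
--     top = pow(base, n - 1, M)
--     i = 0
--     while True:
--         if h == target and query_tokens[i:i + n] == phrase_tokens:
--             return True
--         if i + n == m:
--             return False
--         h = ((h - q[i] * top) * base + q[i + n]) % M
--         i += 1
-- ===== Notes on version B (the rewrite author's own statement) =====
-- stated objective: alternative
-- what changed: Replaces A's slice-comparison of the phrase at every query position with Rabin-Karp: tokens are interned to integer ids once, each window carries a rolling polynomial fingerprint compared against the phrase's fingerprint, and the tokens are re-checked only on a fingerprint hit.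
import Mathlib
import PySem

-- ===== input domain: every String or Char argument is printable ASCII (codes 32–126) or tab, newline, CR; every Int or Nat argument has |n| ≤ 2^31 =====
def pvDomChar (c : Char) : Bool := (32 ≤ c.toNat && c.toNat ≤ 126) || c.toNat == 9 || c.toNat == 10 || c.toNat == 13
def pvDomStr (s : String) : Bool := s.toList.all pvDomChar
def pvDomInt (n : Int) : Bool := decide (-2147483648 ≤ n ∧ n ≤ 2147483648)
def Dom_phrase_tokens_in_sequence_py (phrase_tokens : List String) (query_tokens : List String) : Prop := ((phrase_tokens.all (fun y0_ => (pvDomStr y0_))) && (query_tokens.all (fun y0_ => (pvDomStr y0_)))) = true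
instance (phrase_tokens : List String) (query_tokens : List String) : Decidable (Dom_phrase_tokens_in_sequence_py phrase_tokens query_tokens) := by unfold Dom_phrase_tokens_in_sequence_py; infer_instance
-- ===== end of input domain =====

-- B replaces A's slice-compare-at-every-index scan by Rabin–Karp over interned token
-- ids: a rolling polynomial fingerprint per window, tokens re-checked only on a hit.

-- ===== PORT A =====
-- literal transliteration of _phrase_tokens_in_sequence (early return 'True' becomes the || fold)
def phrase_tokens_in_sequence_py (phrase_tokens : List String) (query_tokens : List String) : Bool :=
  let n : Int := (phrase_tokens.length : Int)
  if n == 0 || n > (query_tokens.length : Int) then false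
  else
    (PySem.List.pyRange 0 ((query_tokens.length : Int) - n + 1) 1).foldl
      (fun acc i =>
        acc || (PySem.List.slice query_tokens (some i) (some (i + n)) == phrase_tokens))
      false

-- ===== PORT B =====
-- the two interning loops of Source B: first-occurrence token -> id (id = current dict size)
def pvIds (toks : List String) (d : PySem.Dict String Int) : PySem.Dict String Int :=
  toks.foldl (fun d t => if (d.get? t).isSome then d else d.insert t (d.size : Int)) d

-- Source B's fixed modulus M = (1 << 61) - 1
def pvM : Int := 2305843009213693951

-- Source B's 'acc = (acc * base + x) % M' accumulation loops (target and initial h)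
def pvPolyMod (base : Int) (xs : List Int) : Int :=
  xs.foldl (fun a x => PySem.Int.mod (a * base + x) pvM) 0

-- the while-True loop of Source B: fingerprint test (+ token verify), exit at i+n==m, roll h
def pvRK (phrase query : List String) (target : Int) (qids : List Int) (base top : Int)
    (n m : Nat) (h : Int) (i : Nat) : Bool :=
  if h == target && (PySem.List.slice query (some (i : Int)) (some ((i : Int) + (n : Int))) == phrase) then
    true
  else if i + n == m then
    false
  else if _hx : i + n < m then  -- totality guard: the Python loop keeps i + n ≤ m
    pvRK phrase query target qids base top n m
      (PySem.Int.mod ((h - (qids.getD i 0) * top) * base + qids.getD (i + n) 0) pvM) (i + 1)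
  else false
termination_by m - i
decreasing_by omega

def phrase_tokens_in_sequence_py_alt (phrase_tokens : List String) (query_tokens : List String) : Bool :=
  let n := phrase_tokens.length
  let m := query_tokens.length
  if n == 0 || decide (m < n) then false
  else
    let d := pvIds phrase_tokens (pvIds query_tokens PySem.Dict.empty)
    let qids := query_tokens.map (fun t => d.getD t 0)
    let pids := phrase_tokens.map (fun t => d.getD t 0)
    let base : Int := (d.size : Int) + 1
    let target := pvPolyMod base pids
    let h := pvPolyMod base (qids.take n)
    let top := PySem.Int.mod (base ^ (n - 1)) pvM   -- pow(base, n - 1, M)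
    pvRK phrase_tokens query_tokens target qids base top n m h 0

-- ===== PRECONDITION & SPEC =====
def Spec_phrase_tokens_in_sequence_py (phrase_tokens : List String) (query_tokens : List String) (out : Bool) : Prop := out = phrase_tokens_in_sequence_py_alt phrase_tokens query_tokens
instance (phrase_tokens : List String) (query_tokens : List String) (out : Bool) : Decidable (Spec_phrase_tokens_in_sequence_py phrase_tokens query_tokens out) := by unfold Spec_phrase_tokens_in_sequence_py; infer_instance

-- ===== CLAIM (what is proved, stated in full; the proofs are below) =====
def Claim_equal_phrase_tokens_in_sequence_py : Prop := ∀ (phrase_tokens : List String) (query_tokens : List String), Dom_phrase_tokens_in_sequence_py phrase_tokens query_tokens → Spec_phrase_tokens_in_sequence_py phrase_tokens query_tokens (phrase_tokens_in_sequence_py phrase_tokens query_tokens)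

-- ===== LEMMAS AND PROOFS =====

-- the exact (un-modded) window polynomial, the proofs' model of the fingerprint
def pvPoly (base : Int) (xs : List Int) : Int :=
  xs.foldl (fun a x => a * base + x) 0

theorem pvMod_eq (a : Int) : PySem.Int.mod a pvM = a % pvM :=
  PySem.Int.mod_eq_emod_of_pos (by norm_num [pvM])

theorem pvPolyMod_acc (b : Int) (xs : List Int) : ∀ a a', a = a' % pvM →
    xs.foldl (fun s x => PySem.Int.mod (s * b + x) pvM) a
      = (xs.foldl (fun s x => s * b + x) a') % pvM := by
  induction xs with
  | nil => intro a a' h; simpa using h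
  | cons x xs ih =>
    intro a a' h
    simp only [List.foldl_cons]
    apply ih
    rw [pvMod_eq]
    have e1 : Int.ModEq pvM a a' := by
      show a % pvM = a' % pvM
      rw [h]
      exact Int.emod_emod_of_dvd a' dvd_rfl
    exact (e1.mul_right b).add_right x

theorem pvPolyMod_eq (b : Int) (xs : List Int) : pvPolyMod b xs = pvPoly b xs % pvM :=
  pvPolyMod_acc b xs 0 0 (by norm_num [pvM])

-- A's fold with early-exit || is an 'any'
theorem pv_foldl_or (l : List Int) (f : Int → Bool) (b : Bool) :
    l.foldl (fun acc i => acc || f i) b = (b || l.any f) := by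
  induction l generalizing b with
  | nil => simp
  | cons x xs ih => simp [List.foldl, ih, Bool.or_assoc]

-- the accumulator form of pvPoly
theorem pvPoly_acc (b a : Int) (xs : List Int) :
    xs.foldl (fun s x => s * b + x) a = a * b ^ xs.length + pvPoly b xs := by
  induction xs generalizing a with
  | nil => simp [pvPoly]
  | cons x xs ih =>
    have hx : pvPoly b (x :: xs) = x * b ^ xs.length + pvPoly b xs := by
      simp only [pvPoly, List.foldl_cons, Int.zero_mul, Int.zero_add]
      exact ih x
    simp only [List.foldl_cons, List.length_cons, hx]
    rw [ih (a * b + x)]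
    ring

theorem pvPoly_cons (b x : Int) (xs : List Int) :
    pvPoly b (x :: xs) = x * b ^ xs.length + pvPoly b xs := by
  simp only [pvPoly, List.foldl_cons, Int.zero_mul, Int.zero_add]
  exact pvPoly_acc b x xs

theorem pvPoly_concat (b y : Int) (xs : List Int) :
    pvPoly b (xs ++ [y]) = pvPoly b xs * b + y := by
  simp [pvPoly, List.foldl_append]

-- window decompositions
theorem pv_win_cons {α : Type} [Inhabited α] (l : List α) (i n : Nat) (h : i < l.length) :
    (l.drop i).take (n + 1) = l.getD i default :: (l.drop (i + 1)).take n := by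
  rw [List.drop_eq_getElem_cons h, List.take_succ_cons, List.getD_eq_getElem l default h]

theorem pv_win_snoc {α : Type} [Inhabited α] (l : List α) (i n : Nat) (h : i + n < l.length) :
    (l.drop i).take (n + 1) = (l.drop i).take n ++ [l.getD (i + n) default] := by
  rw [List.take_succ, List.getElem?_drop]
  rw [List.getElem?_eq_getElem h, List.getD_eq_getElem l default h]
  rfl

theorem pv_win_len {α : Type} (l : List α) (i n : Nat) (h : i + n ≤ l.length) :
    ((l.drop i).take n).length = n := by
  simp [List.length_take, List.length_drop]
  omega

-- the rolling-fingerprint update preserves the window invariant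
theorem pv_roll (b : Int) (q : List Int) (i k : Nat) (h : i + (k + 1) < q.length) :
    pvPoly b ((q.drop (i + 1)).take (k + 1))
      = (pvPoly b ((q.drop i).take (k + 1)) - q.getD i 0 * b ^ k) * b + q.getD (i + (k + 1)) 0 := by
  have hi : i < q.length := by omega
  have h1 : (q.drop i).take (k + 1) = q.getD i 0 :: (q.drop (i + 1)).take k :=
    pv_win_cons q i k hi
  have h2 : (q.drop (i + 1)).take (k + 1) = (q.drop (i + 1)).take k ++ [q.getD ((i + 1) + k) 0] :=
    pv_win_snoc q (i + 1) k (by omega)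
  have hlen : ((q.drop (i + 1)).take k).length = k := pv_win_len q (i + 1) k (by omega)
  have h3 : (i + 1) + k = i + (k + 1) := by omega
  rw [h2, h3, pvPoly_concat, h1, pvPoly_cons, hlen]
  ring

-- main loop characterisation: pvRK is true iff some window at j ≥ i equals the phrase
theorem pvRK_iff (f : String → Int) (phrase query : List String) (base : Int) (n : Nat)
    (hn : n = phrase.length) (hn1 : 1 ≤ n) :
    ∀ (fuel i : Nat) (h : Int), query.length - i ≤ fuel → i + n ≤ query.length →
      h = pvPoly base (((query.map f).drop i).take n) % pvM →
      (pvRK phrase query (pvPolyMod base (phrase.map f)) (query.map f) base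
          (PySem.Int.mod (base ^ (n - 1)) pvM) n query.length h i = true
        ↔ ∃ j : Nat, i ≤ j ∧ j + n ≤ query.length ∧ (query.drop j).take n = phrase) := by
  intro fuel
  induction fuel with
  | zero => intro i h hf hin _; omega
  | succ fuel ih =>
    intro i h hf hin hinv
    have hslice : PySem.List.slice query (some (i : Int)) (some ((i : Int) + (n : Int)))
        = (query.drop i).take n := PySem.List.slice_natCast_add query i n
    -- a matching window forces a fingerprint hit
    have hkey : (query.drop i).take n = phrase → h = pvPolyMod base (phrase.map f) := by
      intro hw
      have hmt : List.take n (List.drop i (query.map f)) = ((query.drop i).take n).map f := by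
        simp [List.map_take, List.map_drop]
      rw [pvPolyMod_eq, hinv, hmt, hw]
    rw [pvRK]
    by_cases hg : ((query.drop i).take n = phrase)
    · rw [if_pos]
      · simp only [true_iff]
        exact ⟨i, le_refl i, hin, hg⟩
      · simp [hslice, hg, hkey hg]
    · rw [if_neg]
      · by_cases hend : i + n = query.length
        · rw [if_pos (show (i + n == query.length) = true by simpa using hend)]
          simp only [Bool.false_eq_true, false_iff]
          rintro ⟨j, hj1, hj2, hj3⟩
          have : j = i := by omega
          exact hg (this ▸ hj3)
        · rw [if_neg (show ¬((i + n == query.length) = true) by simpa using hend), dif_pos (by omega : i + n < query.length)]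
          have hnext : PySem.Int.mod ((h - ((query.map f).getD i 0) * PySem.Int.mod (base ^ (n - 1)) pvM) * base
                + (query.map f).getD (i + n) 0) pvM
              = pvPoly base (((query.map f).drop (i + 1)).take n) % pvM := by
            obtain ⟨k, rfl⟩ : ∃ k, n = k + 1 := ⟨n - 1, by omega⟩
            rw [pvMod_eq, pvMod_eq, hinv, pv_roll base (query.map f) i k (by simp; omega)]
            have e1 : Int.ModEq pvM (pvPoly base (((query.map f).drop i).take (k + 1)) % pvM)
                (pvPoly base (((query.map f).drop i).take (k + 1))) :=
              Int.emod_emod_of_dvd _ dvd_rfl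
            have e2 : Int.ModEq pvM (base ^ (k + 1 - 1) % pvM) (base ^ k) := by
              simp only [Nat.add_sub_cancel]
              exact Int.emod_emod_of_dvd _ dvd_rfl
            exact ((e1.sub (e2.mul_left ((query.map f).getD i 0))).mul_right base).add_right
              ((query.map f).getD (i + (k + 1)) 0)
          rw [ih (i + 1) _ (by omega) (by omega) hnext]
          constructor
          · rintro ⟨j, hj1, hj2, hj3⟩
            exact ⟨j, by omega, hj2, hj3⟩
          · rintro ⟨j, hj1, hj2, hj3⟩
            rcases Nat.eq_or_lt_of_le hj1 with rfl | hlt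
            · exact absurd hj3 hg
            · exact ⟨j, hlt, hj2, hj3⟩
      · simp [hslice, hg]

-- ===== VERDICT (by name: the statement is the Claim_ definition above) =====
theorem phrase_tokens_in_sequence_py_spec : Claim_equal_phrase_tokens_in_sequence_py := by
  intro p q _
  unfold Spec_phrase_tokens_in_sequence_py
  match p with
  | [] => simp [phrase_tokens_in_sequence_py, phrase_tokens_in_sequence_py_alt]
  | first :: rest =>
    set phrase := first :: rest with hphrase
    have hn1 : 1 ≤ phrase.length := by simp [hphrase]
    by_cases hle : (q.length < phrase.length)
    · -- phrase longer than query: both sides take the early-False branch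
      have hA : phrase_tokens_in_sequence_py phrase q = false := by
        simp only [phrase_tokens_in_sequence_py]
        rw [if_pos]
        simp only [Bool.or_eq_true, decide_eq_true_iff]
        right
        exact_mod_cast hle
      have hB : phrase_tokens_in_sequence_py_alt phrase q = false := by
        simp only [phrase_tokens_in_sequence_py_alt]
        rw [if_pos]
        simp only [Bool.or_eq_true, beq_iff_eq, decide_eq_true_iff]
        right
        exact hle
      rw [hA, hB]
    · rw [not_lt] at hle
      rw [Bool.eq_iff_iff]
      -- A's scan is an existential over Int start positions
      have hA : phrase_tokens_in_sequence_py phrase q = true ↔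
          ∃ j : Nat, j + phrase.length ≤ q.length ∧ (q.drop j).take phrase.length = phrase := by
        simp only [phrase_tokens_in_sequence_py]
        rw [if_neg, pv_foldl_or]
        · simp only [Bool.false_or, List.any_eq_true, PySem.List.mem_pyRange_one, beq_iff_eq]
          constructor
          · rintro ⟨x, ⟨hx1, hx2⟩, hx3⟩
            refine ⟨x.toNat, by omega, ?_⟩
            have hxx : ((x.toNat : Nat) : Int) = x := Int.toNat_of_nonneg hx1
            rw [← PySem.List.slice_natCast_add q x.toNat phrase.length, hxx]
            exact hx3
          · rintro ⟨j, hj1, hj2⟩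
            refine ⟨(j : Int), ⟨by omega, by omega⟩, ?_⟩
            rw [PySem.List.slice_natCast_add q j phrase.length]
            exact hj2
        · simp only [Bool.or_eq_true, decide_eq_true_iff, beq_iff_eq]
          omega
      rw [hA]
      -- B's loop, via the window invariant
      simp only [phrase_tokens_in_sequence_py_alt]
      rw [if_neg]
      · set d := pvIds phrase (pvIds q PySem.Dict.empty) with hd
        set f : String → Int := fun t => d.getD t 0 with hf
        rw [pvRK_iff f phrase q ((d.size : Int) + 1) phrase.length rfl hn1
            q.length 0 _ (by omega) (by omega) (by simp [pvPolyMod_eq])]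
        constructor
        · rintro ⟨j, hj2, hj3⟩; exact ⟨j, Nat.zero_le j, hj2, hj3⟩
        · rintro ⟨j, _, hj2, hj3⟩; exact ⟨j, hj2, hj3⟩
      · simp only [Bool.or_eq_true, beq_iff_eq, decide_eq_true_iff]
        exact not_or.mpr ⟨by simp [hphrase], by omega⟩
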